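-- pv_equiv track=rewrite | github.com/Taoge123/OptimizedLeetcode | LeetcodeNew/python2/LC_1482.py | count
-- ===== SOURCE A (Python) =====
-- def count(nums, day, k):
--     count = 0
--     summ = 0
--     for num in nums:
--         if num > day:
--             summ = 0
--         else:
--             summ += 1
--             if summ == k:
--                 count += 1
--                 summ = 0
--     return count
-- ===== SOURCE B (Python) =====
-- def count(nums, day, k):
--     # staged computation: list the indices of unbloomed flowers as boundaries,
--     # then sum floor(gap/k) over the gap widths between adjacent boundaries
--     if k <= 0:
--         return 0
--     bounds = [-1] + [i for i, x in enumerate(nums) if x > day] + [len(nums)]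
--     return sum((b - a - 1) // k for a, b in zip(bounds, bounds[1:]))
-- ===== Notes on version B (the rewrite author's own statement) =====
-- stated objective: alternative
-- what changed: B carries no per-element run/counter state: it first materialises the index list of unbloomed flowers, brackets it with -1 and len(nums), and sums floor((b-a-1)/k) over adjacent boundary pairs, replacing A's streaming reset-counter scan.
import Mathlib
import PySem

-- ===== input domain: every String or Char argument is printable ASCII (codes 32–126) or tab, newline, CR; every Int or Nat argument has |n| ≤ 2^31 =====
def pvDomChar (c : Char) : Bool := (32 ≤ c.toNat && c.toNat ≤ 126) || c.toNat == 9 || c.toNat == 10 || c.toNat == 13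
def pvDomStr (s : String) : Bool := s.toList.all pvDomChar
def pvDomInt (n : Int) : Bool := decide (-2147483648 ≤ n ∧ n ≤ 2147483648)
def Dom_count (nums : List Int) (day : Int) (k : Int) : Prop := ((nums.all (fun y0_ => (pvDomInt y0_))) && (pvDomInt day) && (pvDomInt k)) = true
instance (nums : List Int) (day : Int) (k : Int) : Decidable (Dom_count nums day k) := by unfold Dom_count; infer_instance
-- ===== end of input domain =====

-- B replaces A's streaming reset-counter scan with a staged computation: list the indices of unbloomed flowers, bracket them with -1 and len(nums), and sum floor((b-a-1)/k) over adjacent boundary pairs; alternative decomposition, same O(n) cost.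


-- ===== PORT A =====
def count (nums : List Int) (day : Int) (k : Int) : Int :=
  (nums.foldl (fun (st : Int × Int) num =>
    if num > day then (st.1, 0)
    else if st.2 + 1 = k then (st.1 + 1, 0) else (st.1, st.2 + 1)) (0, 0)).1

-- ===== PORT B =====
def count_alt (nums : List Int) (day : Int) (k : Int) : Int :=
  if k ≤ 0 then 0
  else
    let bounds : List Int :=
      -1 :: ((PySem.List.enumerate nums).filterMap
              (fun p => if p.2 > day then some p.1 else none)
         ++ [(nums.length : Int)])
    ((bounds.zip (bounds.drop 1)).map
      (fun p => PySem.Int.floordiv (p.2 - p.1 - 1) k)).sum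

-- ===== PRECONDITION & SPEC =====
def Spec_count (nums : List Int) (day : Int) (k : Int) (out : Int) : Prop := out = count_alt nums day k
instance (nums : List Int) (day : Int) (k : Int) (out : Int) : Decidable (Spec_count nums day k out) := by unfold Spec_count; infer_instance

-- ===== CLAIM (what is proved, stated in full; the proofs are below) =====
def Claim_equal_count : Prop := ∀ (nums : List Int) (day : Int) (k : Int), Dom_count nums day k → Spec_count nums day k (count nums day k)

-- ===== LEMMAS AND PROOFS =====

-- proof-only helper: gap sum over the boundary list a :: bs ++ [n]
def gs (k a : Int) : List Int → Int → Int
  | [], n => PySem.Int.floordiv (n - a - 1) k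
  | b :: bs, n => PySem.Int.floordiv (b - a - 1) k + gs k b bs n

-- proof-only helper: recursive characterisation over nums, carrying the current run length r
def bcore (day k : Int) (r : Int) : List Int → Int
  | [] => r / k
  | x :: xs => if x > day then r / k + bcore day k 0 xs else bcore day k (r + 1) xs

-- L1: the zip-of-adjacent-boundaries sum equals gs
theorem zip_sum_eq_gs (k : Int) (bs : List Int) (a n : Int) :
    (((a :: (bs ++ [n])).zip (bs ++ [n])).map
      (fun p => PySem.Int.floordiv (p.2 - p.1 - 1) k)).sum = gs k a bs n := by
  induction bs generalizing a with
  | nil => simp [gs]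
  | cons b bs ih => simpa [gs] using congrArg (PySem.Int.floordiv (b - a - 1) k + ·) (ih b)

-- L2: gs over the filtered blocker indices equals bcore
theorem gs_blockers_eq_bcore (day k : Int) (hk : 0 < k) (nums : List Int) :
    ∀ (s a : Int),
    gs k a ((PySem.List.enumerate nums s).filterMap
      (fun p => if p.2 > day then some p.1 else none)) (s + nums.length) =
    bcore day k (s - a - 1) nums := by
  induction nums with
  | nil =>
    intro s a
    simp [PySem.List.enumerate_nil, gs, bcore,
      PySem.Int.floordiv_eq_ediv_of_pos hk]
  | cons x xs ih =>
    intro s a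
    rw [PySem.List.enumerate_cons]
    have hn : s + ((x :: xs).length : Int) = (s + 1) + (xs.length : Int) := by
      rw [List.length_cons]; push_cast; omega
    by_cases hx : x > day
    · have hih := ih (s + 1) s
      simp only [List.filterMap_cons, if_pos hx, gs, bcore, hn]
      rw [hih, PySem.Int.floordiv_eq_ediv_of_pos hk]
      norm_num
    · have hih := ih (s + 1) a
      have hr : (s + 1) - a - 1 = (s - a - 1) + 1 := by ring
      simp only [List.filterMap_cons, if_neg hx, bcore, hn]
      rw [hih, hr]

-- L3: A's fold, started with the current run's residue, equals bcore up to the pending r / k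
theorem afold_eq_bcore (day k : Int) (hk : 0 < k) (nums : List Int) :
    ∀ (c r : Int), 0 ≤ r →
    (nums.foldl (fun (st : Int × Int) num =>
      if num > day then (st.1, 0)
      else if st.2 + 1 = k then (st.1 + 1, 0) else (st.1, st.2 + 1)) (c, r % k)).1 + r / k =
    c + bcore day k r nums := by
  induction nums with
  | nil => intro c r _; simp [bcore]
  | cons x xs ih =>
    intro c r hr
    have hrm : 0 ≤ r % k ∧ r % k < k := ⟨Int.emod_nonneg r (by omega), Int.emod_lt_of_pos r hk⟩
    have hre : r % k + k * (r / k) = r := Int.emod_add_mul_ediv r k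
    have key : r + 1 = (r % k + 1) + k * (r / k) := by omega
    have e1 : (r + 1) % k = (r % k + 1) % k := by rw [key]; exact Int.add_mul_emod_self_left ..
    have e2 : (r + 1) / k = (r % k + 1) / k + r / k := by
      rw [key]; exact Int.add_mul_ediv_left _ _ (ne_of_gt hk)
    simp only [List.foldl_cons, bcore]
    by_cases hx : x > day
    · have h0 : (0 : Int) % k = 0 := Int.zero_emod k
      have := ih c 0 le_rfl
      rw [h0] at this
      simp only [hx, if_pos] at this ⊢
      have h0d : (0 : Int) / k = 0 := Int.zero_ediv k
      rw [h0d, add_zero] at this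
      omega
    · by_cases hsk : r % k + 1 = k
      · have hmm0 : (r + 1) % k = 0 := by rw [e1, hsk, Int.emod_self]
        have hdd : (r + 1) / k = r / k + 1 := by
          rw [e2, hsk, Int.ediv_self (ne_of_gt hk)]; omega
        have hih := ih (c + 1) (r + 1) (by omega)
        rw [hmm0] at hih
        simp only [if_neg hx, if_pos hsk] at *
        omega
      · have hmm2 : (r + 1) % k = r % k + 1 := by
          rw [e1]; exact Int.emod_eq_of_lt (by omega) (by omega)
        have hdd : (r + 1) / k = r / k := by
          rw [e2, Int.ediv_eq_zero_of_lt (by omega) (by omega)]; omega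
        have hih := ih c (r + 1) (by omega)
        rw [hmm2] at hih
        simp only [if_neg hx, if_neg hsk] at *
        omega

-- k ≤ 0: A's counter summ stays ≥ 0 after each increment, so summ = k never fires and count stays 0
theorem countA_nonpos (day k : Int) (hk : k ≤ 0) (nums : List Int) :
    ∀ (c s : Int), 0 ≤ s →
    (nums.foldl (fun (st : Int × Int) num =>
      if num > day then (st.1, 0)
      else if st.2 + 1 = k then (st.1 + 1, 0) else (st.1, st.2 + 1)) (c, s)).1 = c := by
  induction nums with
  | nil => intro c s _; rfl
  | cons x xs ih =>
    intro c s hs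
    simp only [List.foldl_cons]
    by_cases hx : x > day
    · simpa [hx] using ih c 0 le_rfl
    · have hne : ¬ (s + 1 = k) := by omega
      simpa [hx, hne] using ih c (s + 1) (by omega)

-- ===== VERDICT (by name: the statement is the Claim_ definition above) =====
theorem count_spec : Claim_equal_count := by
  intro nums day k _
  unfold Spec_count count count_alt
  by_cases hk : k ≤ 0
  · simp only [hk, if_pos]
    exact countA_nonpos day k hk nums 0 0 le_rfl
  · have hk' : 0 < k := by omega
    simp only [if_neg hk]
    rw [List.drop_one, List.tail_cons, zip_sum_eq_gs]
    have h2 := gs_blockers_eq_bcore day k hk' nums 0 (-1)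
    rw [zero_add] at h2
    have h0 : (0 : Int) - (-1) - 1 = 0 := by ring
    rw [h0] at h2
    rw [h2]
    have h3 := afold_eq_bcore day k hk' nums 0 0 le_rfl
    have hm : (0 : Int) % k = 0 := Int.zero_emod k
    have hd : (0 : Int) / k = 0 := Int.zero_ediv k
    rw [hm, hd] at h3
    omega
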